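-- pv_equiv track=rewrite | github.com/armanyavryan/homeWorkPy | functions.py | is_borring
-- ===== SOURCE A (Python) =====
-- def is_borring(number):
--     x = number % 10
--     number //= 10
--     while number > 0:
--         y = number % 10
--         if y != x:
--             break
--         number //= 10
--
--     return number <= 0
-- ===== SOURCE B (Python) =====
-- def digits_of(n):
--     return [] if n <= 0 else [n % 10] + digits_of(n // 10)
--
-- def is_borring(number):
--     ds = digits_of(number)
--     return all(d == ds[0] for d in ds)
-- ===== Notes on version B (the rewrite author's own statement) =====
-- stated objective: alternative
-- what changed: B is a two-stage recursive decomposition: a recursive helper builds the full list of digits first, then a separate all-equal-to-first pass decides the result, instead of A's fused while loop comparing against a saved reference digit with an early break.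
import Mathlib
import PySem

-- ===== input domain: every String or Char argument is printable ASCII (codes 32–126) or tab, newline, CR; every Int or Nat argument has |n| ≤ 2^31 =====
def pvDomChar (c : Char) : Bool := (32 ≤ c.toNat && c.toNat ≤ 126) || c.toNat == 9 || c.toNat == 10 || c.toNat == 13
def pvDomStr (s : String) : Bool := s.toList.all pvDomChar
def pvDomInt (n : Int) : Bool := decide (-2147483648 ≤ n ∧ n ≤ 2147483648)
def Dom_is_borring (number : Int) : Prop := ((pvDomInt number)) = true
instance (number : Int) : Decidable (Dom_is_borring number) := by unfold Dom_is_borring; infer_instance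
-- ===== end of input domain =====

-- B is a two-stage recursive decomposition (build the digit list, then check all equal to the
-- first) instead of A's fused reference-digit while loop with early break; same cost.

-- ===== PORT A =====
-- while number > 0: y = number % 10; if y != x: break; number //= 10   — returns the final 'number'
def isbA_loop (x : Int) (number : Int) : Int :=
  if h : number > 0 then
    let y := PySem.Int.mod number 10
    if y ≠ x then number
    else isbA_loop x (PySem.Int.floordiv number 10)
  else number
termination_by number.toNat
decreasing_by
  have h1 : PySem.Int.floordiv number 10 < number := by
    rw [PySem.Int.floordiv_eq_ediv_of_pos (by omega)]; omega
  have h0 : 0 ≤ PySem.Int.floordiv number 10 := by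
    rw [PySem.Int.floordiv_eq_ediv_of_pos (by omega)]; omega
  omega

def is_borring (number : Int) : Bool :=
  let x := PySem.Int.mod number 10
  let number := PySem.Int.floordiv number 10
  let number := isbA_loop x number
  decide (number ≤ 0)

-- ===== PORT B =====
-- def digits_of(n): return [] if n <= 0 else [n % 10] + digits_of(n // 10)
def digits_of (n : Int) : List Int :=
  if hle : n ≤ 0 then []
  else [PySem.Int.mod n 10] ++ digits_of (PySem.Int.floordiv n 10)
termination_by n.toNat
decreasing_by
  have h1 : PySem.Int.floordiv n 10 < n := by
    rw [PySem.Int.floordiv_eq_ediv_of_pos (by omega)]; omega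
  have h0 : 0 ≤ PySem.Int.floordiv n 10 := by
    rw [PySem.Int.floordiv_eq_ediv_of_pos (by omega)]; omega
  omega

-- all(d == ds[0] for d in ds): ds[0] is only evaluated when ds is nonempty, where it is ds.getD 0 0
def is_borring_alt (number : Int) : Bool :=
  let ds := digits_of number
  ds.all (fun d => d == ds.getD 0 0)

-- ===== PRECONDITION & SPEC =====
def Spec_is_borring (number : Int) (out : Bool) : Prop := out = is_borring_alt number
instance (number : Int) (out : Bool) : Decidable (Spec_is_borring number out) := by unfold Spec_is_borring; infer_instance

-- ===== CLAIM (what is proved, stated in full; the proofs are below) =====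
def Claim_equal_is_borring : Prop := ∀ (number : Int), Dom_is_borring number → Spec_is_borring number (is_borring number)

-- ===== LEMMAS AND PROOFS =====

-- A's loop ends at a nonpositive number exactly when every remaining digit equals the reference x.
theorem isbA_loop_eq_all (x m : Int) :
    decide (isbA_loop x m ≤ 0) = (digits_of m).all (fun d => d == x) := by
  induction m using isbA_loop.induct x with
  | case1 m h yv hy =>
    rw [isbA_loop, digits_of]
    simp only [dif_pos h, dif_neg (show ¬ m ≤ 0 by omega)]
    rw [if_pos hy]
    have hy0 : PySem.Int.mod m 10 ≠ x := hy
    simp only [List.singleton_append, List.all_cons]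
    rw [decide_eq_false_iff_not.mpr (show ¬ m ≤ 0 by omega),
        beq_eq_false_iff_ne.mpr hy0, Bool.false_and]
  | case2 m h yv hy ih =>
    rw [isbA_loop, digits_of]
    simp only [dif_pos h, dif_neg (show ¬ m ≤ 0 by omega)]
    rw [if_neg hy]
    have hy0 : PySem.Int.mod m 10 = x := not_not.mp hy
    simp only [List.singleton_append, List.all_cons]
    rw [ih, beq_iff_eq.mpr hy0, Bool.true_and]
  | case3 m h =>
    rw [isbA_loop, digits_of]
    simp only [dif_neg h, dif_pos (show m ≤ 0 by omega)]
    simp [show m ≤ 0 by omega]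

-- ===== VERDICT (by name: the statement is the Claim_ definition above) =====
theorem is_borring_spec : Claim_equal_is_borring := by
  intro number _
  simp only [Spec_is_borring, is_borring, is_borring_alt]
  by_cases h : 0 < number
  · rw [digits_of]
    simp only [dif_neg (show ¬ number ≤ 0 by omega)]
    simp only [List.singleton_append, List.getD_cons_zero, List.all_cons, beq_self_eq_true,
      Bool.true_and]
    exact isbA_loop_eq_all (PySem.Int.mod number 10) (PySem.Int.floordiv number 10)
  · have hfd : PySem.Int.floordiv number 10 ≤ 0 := by
      rw [PySem.Int.floordiv_eq_ediv_of_pos (by omega)]; omega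
    rw [isbA_loop, digits_of]
    simp only [dif_neg (show ¬ PySem.Int.floordiv number 10 > 0 by omega),
      dif_pos (show number ≤ 0 by omega)]
    rw [PySem.Int.floordiv_eq_ediv_of_pos (by omega)] at hfd
    simp [hfd]
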